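-- pv_equiv track=rewrite | github.com/Absurd1ty/Python-Practice-All | problems_py7/plaindrome.py | longestPalindrome_set
-- ===== SOURCE A (Python) =====
-- def longestPalindrome_set(s):
--     letters = set()
--     for letter in s:
--         if letter not in letters:
--             letters.add(letter)
--         else:
--             letters.remove(letter)
--     if len(letters) != 0:
--         return len(s) - len(letters) + 1
--     else:
--         return len(s)
-- ===== SOURCE B (Python) =====
-- def longestPalindrome_set(s):
--     # Pass 1: build a frequency table of the letters.
--     counts = {}
--     for ch in s:
--         counts[ch] = counts.get(ch, 0) + 1
--     # Pass 2: combine the distinct counts.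
--     length = 0
--     has_odd = False
--     for c in counts.values():
--         length += c // 2 * 2
--         if c % 2 == 1:
--             has_odd = True
--     return length + 1 if has_odd else length
-- ===== Notes on version B (the rewrite author's own statement) =====
-- stated objective: idiomatic
-- what changed: Replaces A's per-character parity-toggle set (membership test + add/remove per character, then a closed-form on the final set size) by a count-then-compute decomposition: one pass builds a frequency table, a second pass over the distinct counts sums c//2*2 and tracks an odd flag.
import Mathlib
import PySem

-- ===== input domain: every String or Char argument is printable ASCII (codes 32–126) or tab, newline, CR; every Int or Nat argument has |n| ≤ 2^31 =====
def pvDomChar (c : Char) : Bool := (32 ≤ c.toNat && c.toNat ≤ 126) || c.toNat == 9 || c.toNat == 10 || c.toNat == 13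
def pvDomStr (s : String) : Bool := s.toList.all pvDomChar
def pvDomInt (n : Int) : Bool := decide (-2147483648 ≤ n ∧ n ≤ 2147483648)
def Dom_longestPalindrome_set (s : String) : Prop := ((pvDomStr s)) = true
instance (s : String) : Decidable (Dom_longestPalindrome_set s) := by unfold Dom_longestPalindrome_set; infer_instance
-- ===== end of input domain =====

-- B replaces A's per-character parity-toggle set by a two-pass count-then-compute decomposition (idiomatic; same cost).


-- ===== PORT A =====
-- loop body of A: 'if letter not in letters: letters.add(letter) else: letters.remove(letter)'
-- (in the else branch the element IS in the set, so Python's remove — which only raises when absent — is exactly discard)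
def pvToggle (letters : PySem.Set Char) (letter : Char) : PySem.Set Char :=
  if ¬ PySem.Set.contains letters letter then PySem.Set.add letters letter
  else PySem.Set.discard letters letter

def longestPalindrome_set (s : String) : Int :=
  let letters : PySem.Set Char := s.toList.foldl pvToggle PySem.Set.empty
  if PySem.Set.len letters ≠ 0 then PySem.Str.len s - PySem.Set.len letters + 1
  else PySem.Str.len s

-- ===== PORT B =====
-- pass 1 body: counts[ch] = counts.get(ch, 0) + 1
def pvBump (d : PySem.Dict Char Int) (ch : Char) : PySem.Dict Char Int :=
  d.insert ch (d.getD ch 0 + 1)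

-- pass 2 body: length += c // 2 * 2; if c % 2 == 1: has_odd = True   (state = (length, has_odd))
def pvAcc (p : Int × Bool) (c : Int) : Int × Bool :=
  (p.1 + PySem.Int.floordiv c 2 * 2, if PySem.Int.mod c 2 = 1 then true else p.2)

def longestPalindrome_set_alt (s : String) : Int :=
  let counts : PySem.Dict Char Int := s.toList.foldl pvBump PySem.Dict.empty
  let r : Int × Bool := (PySem.Dict.values counts).foldl pvAcc (0, false)
  if r.2 then r.1 + 1 else r.1

-- ===== PRECONDITION & SPEC =====
def Spec_longestPalindrome_set (s : String) (out : Int) : Prop := out = longestPalindrome_set_alt s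
instance (s : String) (out : Int) : Decidable (Spec_longestPalindrome_set s out) := by unfold Spec_longestPalindrome_set; infer_instance

-- ===== CLAIM (what is proved, stated in full; the proofs are below) =====
def Claim_equal_longestPalindrome_set : Prop := ∀ (s : String), Dom_longestPalindrome_set s → Spec_longestPalindrome_set s (longestPalindrome_set s)

-- ===== LEMMAS AND PROOFS =====

-- A's toggle loop: starting from a duplicate-free set S, the result is duplicate-free and
-- contains c iff membership in S xor 'c occurs an odd number of times in l'.
lemma pvToggle_fold (l : List Char) : ∀ S : PySem.Set Char, S.Nodup →
    (l.foldl pvToggle S).Nodup ∧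
    ∀ c : Char, c ∈ l.foldl pvToggle S ↔ ((c ∈ S) ↔ l.count c % 2 = 0) := by
  induction l with
  | nil =>
    intro S hS
    refine ⟨hS, fun c => ?_⟩
    simp
  | cons x l ih =>
    intro S hS
    have hS' : (pvToggle S x).Nodup := by
      unfold pvToggle
      split
      · exact PySem.Set.nodup_add S x hS
      · exact PySem.Set.nodup_discard S x hS
    obtain ⟨h1, h2⟩ := ih (pvToggle S x) hS'
    refine ⟨by simpa using h1, fun c => ?_⟩
    have hmem : c ∈ pvToggle S x ↔ (if c = x then ¬ (c ∈ S) else c ∈ S) := by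
      unfold pvToggle
      split <;> rename_i hx
      · rw [PySem.Set.contains_iff] at hx
        rw [PySem.Set.mem_add]
        by_cases hcx : c = x <;> simp [hcx, hx]
      · rw [not_not, PySem.Set.contains_iff] at hx
        rw [PySem.Set.mem_discard]
        by_cases hcx : c = x <;> simp [hcx, hx]
    rw [List.foldl_cons, h2 c, hmem]
    by_cases hcx : c = x
    · subst hcx
      simp only [List.count_cons_self]
      by_cases hcs : c ∈ S <;> simp [hcs] <;> omega
    · rw [List.count_cons]
      simp [hcx, show ¬ (x = c) from fun h => hcx h.symm]

-- the second pass of B, in closed form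
lemma pvAcc_fold (cs : List Int) : ∀ (a : Int) (b : Bool),
    cs.foldl pvAcc (a, b) =
      (a + (cs.map (fun c => PySem.Int.floordiv c 2 * 2)).sum,
       b || cs.any (fun c => decide (PySem.Int.mod c 2 = 1))) := by
  induction cs with
  | nil => intro a b; simp
  | cons c cs ih =>
    intro a b
    simp only [List.foldl_cons, pvAcc, ih, List.map_cons, List.sum_cons, List.any_cons,
      Prod.mk.injEq]
    refine ⟨by ring, ?_⟩
    cases b <;> simp

-- sum of counts over any duplicate-free enumeration of l's elements is l.length
lemma sum_counts (l : List Char) (D : List Char) (hD : D.Nodup) (hmem : ∀ c, c ∈ D ↔ c ∈ l) :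
    (D.map (fun k => l.count k)).sum = l.length := by
  have hperm : D.Perm l.dedup :=
    (List.perm_ext_iff_of_nodup hD (List.nodup_dedup l)).2 fun c => by
      rw [hmem, List.mem_dedup]
  calc (D.map (fun k => l.count k)).sum
      = (l.dedup.map (fun k => l.count k)).sum := (hperm.map _).sum_eq
    _ = l.length := List.sum_map_count_dedup_eq_length l

-- pointwise subtraction distributes over a mapped sum (not in Mathlib/PySem under this shape)
lemma sum_map_sub_int (l : List Char) (f g : Char → Int) :
    (l.map (fun k => f k - g k)).sum = (l.map f).sum - (l.map g).sum := by
  induction l with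
  | nil => simp
  | cons x l ih => simp only [List.map_cons, List.sum_cons, ih]; ring

-- the whole equivalence, on the character list
lemma main_list (l : List Char) :
    (if PySem.Set.len (l.foldl pvToggle PySem.Set.empty) ≠ 0
       then (l.length : Int) - PySem.Set.len (l.foldl pvToggle PySem.Set.empty) + 1
       else (l.length : Int))
    = (if ((PySem.Dict.values (l.foldl pvBump PySem.Dict.empty)).foldl pvAcc (0, false)).2
         then ((PySem.Dict.values (l.foldl pvBump PySem.Dict.empty)).foldl pvAcc (0, false)).1 + 1
         else ((PySem.Dict.values (l.foldl pvBump PySem.Dict.empty)).foldl pvAcc (0, false)).1) := by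
  obtain ⟨hSnd, hSmem⟩ := pvToggle_fold l PySem.Set.empty List.nodup_nil
  -- A's final set holds exactly the characters with an odd count
  have hS1 : ∀ c, c ∈ l.foldl pvToggle PySem.Set.empty ↔ l.count c % 2 = 1 := by
    intro c
    rw [hSmem c]
    simp only [PySem.Set.empty, List.not_mem_nil, false_iff]
    omega
  -- p marks the odd-count characters; D is the distinct characters of l
  set p : Char → Bool := fun c => decide (l.count c % 2 = 1) with hp
  set D : List Char := PySem.Set.ofList l with hD
  have hperm : (l.foldl pvToggle PySem.Set.empty).Perm (D.filter p) :=
    (List.perm_ext_iff_of_nodup hSnd ((PySem.Set.nodup_ofList l).filter p)).2 fun c => by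
      rw [hS1 c, List.mem_filter, PySem.Set.mem_ofList]
      constructor
      · intro h
        exact ⟨List.count_pos_iff.1 (by omega), by simp [hp, h]⟩
      · rintro ⟨-, hpc⟩
        simpa [hp] using hpc
  have hlen : (l.foldl pvToggle PySem.Set.empty).length = D.countP p :=
    hperm.length_eq.trans List.countP_eq_length_filter.symm
  -- B's dict is Counter(l); its values are the counts of the distinct characters
  have hc : l.foldl pvBump PySem.Dict.empty = PySem.Dict.counter l :=
    PySem.Dict.foldl_insert_getD_add_one_eq_counter l
  have hV : PySem.Dict.values (l.foldl pvBump PySem.Dict.empty)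
      = D.map (fun k => ((l.count k : Nat) : Int)) := by
    rw [hc]
    simp only [PySem.Dict.values, PySem.Dict.items_counter, List.map_map, hD]
    rfl
  rw [hV, pvAcc_fold, List.map_map, List.any_map]
  -- the summed terms: c // 2 * 2 = c - (1 if c odd else 0)
  have hterm : (fun c => PySem.Int.floordiv c 2 * 2) ∘ (fun k => ((l.count k : Nat) : Int))
      = fun k => ((l.count k : Nat) : Int) - (if p k = true then (1 : Int) else 0) := by
    funext k
    simp only [Function.comp, PySem.Int.floordiv_eq_ediv_of_pos (by norm_num : (0:Int) < 2),
      hp, decide_eq_true_eq]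
    split <;> omega
  -- the oddness tests agree
  have hodd : ((fun c => decide (PySem.Int.mod c 2 = 1)) ∘ (fun k => ((l.count k : Nat) : Int))) = p := by
    funext k
    simp only [Function.comp, PySem.Int.mod_eq_emod_of_pos (by norm_num : (0:Int) < 2), hp,
      decide_eq_decide]
    omega
  rw [hterm, hodd, sum_map_sub_int, PySem.List.sum_map_ite_one_zero]
  have hcnt : ((D.map (fun k => ((l.count k : Nat) : Int))).sum) = (l.length : Int) := by
    rw [show (fun k => ((l.count k : Nat) : Int)) = (Nat.cast ∘ fun k => l.count k) from rfl,
      ← List.map_map, ← Nat.cast_list_sum,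
      sum_counts l D (hD ▸ PySem.Set.nodup_ofList l) (fun c => hD ▸ PySem.Set.mem_ofList l c)]
  rw [hcnt]
  simp only [PySem.Set.len, hlen, Bool.false_or, zero_add]
  by_cases h : D.any p
  · have h1 : 0 < D.countP p := List.countP_pos_iff.2 (List.any_eq_true.1 h)
    simp only [h, if_true, ne_eq]
    rw [if_pos (by exact_mod_cast h1.ne')]
  · have h1 : D.countP p = 0 := by
      rcases Nat.eq_zero_or_pos (D.countP p) with h0 | h0
      · exact h0
      · exact absurd (List.any_eq_true.2 (List.countP_pos_iff.1 h0)) h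
    simp [h, h1]

-- ===== VERDICT (by name: the statement is the Claim_ definition above) =====
theorem longestPalindrome_set_spec : Claim_equal_longestPalindrome_set := by
  intro s _
  unfold Spec_longestPalindrome_set longestPalindrome_set longestPalindrome_set_alt
  simpa [PySem.Str.len] using main_list s.toList
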